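-- pv_equiv track=rewrite | github.com/DimosKan/cs50x | sentimental-readability/readability.py | wordScanner
-- ===== SOURCE A (Python) =====
-- def wordScanner(sentence, str_l):
--     """ Counts letters, sentences and words in an inputted text """
--     letter_count = 0
--     sentence_count = 0
--     word_count = 1
--     for i in range(str_l):
--         # Checks the letters, it does it by checking if something is alphanumeric
--         if sentence[i].isalnum():
--             letter_count += 1
--         # If there is a . ? or ! character that means that a sentence has ended.
--         if sentence[i] == '.' or sentence[i] == '?' or sentence[i] == '!':
--             sentence_count += 1
--         # Checks for spaces, that means a word has ended.
--         if sentence[i] == " ":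
--             word_count += 1
--     # returns all the results as a table.
--     return [sentence, str_l, letter_count, sentence_count, word_count]
-- ===== SOURCE B (Python) =====
-- def wordScanner(sentence, str_l):
--     """ Counts letters, sentences and words in an inputted text """
--     # Histogram approach: build a character-frequency dict of the scanned prefix
--     # once, then derive every count from the frequencies of the distinct characters.
--     freq = {}
--     for c in sentence[:max(0, str_l)]:
--         freq[c] = freq.get(c, 0) + 1
--     letter_count = sum(n for c, n in freq.items() if c.isalnum())
--     sentence_count = freq.get('.', 0) + freq.get('?', 0) + freq.get('!', 0)
--     word_count = 1 + freq.get(' ', 0)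
--     return [sentence, str_l, letter_count, sentence_count, word_count]
-- ===== Notes on version B (the rewrite author's own statement) =====
-- stated objective: alternative
-- what changed: Replaces A's single index loop that updates three counters per character with a histogram algorithm: one dict of character frequencies over the scanned prefix is built, and the letter/sentence/word counts are then derived from the frequencies of the distinct characters (sum over alphanumeric keys; direct lookups of '.', '?', '!' and ' ').
import Mathlib
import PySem

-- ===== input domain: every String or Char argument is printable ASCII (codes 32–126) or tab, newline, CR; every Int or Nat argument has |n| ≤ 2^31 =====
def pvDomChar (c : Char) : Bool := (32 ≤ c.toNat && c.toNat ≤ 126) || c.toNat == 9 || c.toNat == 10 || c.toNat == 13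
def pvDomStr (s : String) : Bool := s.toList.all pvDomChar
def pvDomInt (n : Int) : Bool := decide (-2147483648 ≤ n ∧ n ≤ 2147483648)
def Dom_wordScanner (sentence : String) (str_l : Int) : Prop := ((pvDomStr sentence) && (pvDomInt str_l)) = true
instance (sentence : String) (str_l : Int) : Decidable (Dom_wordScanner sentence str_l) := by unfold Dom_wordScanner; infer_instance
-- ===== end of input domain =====

-- B replaces A's index loop that updates three counters per character by a different
-- algorithm: it builds a character-frequency histogram (dict) of the scanned prefix once
-- and derives every count from the frequencies of the distinct characters.

-- ===== PORT A =====
-- One combined loop over range(str_l); sentence[i] is total here via a default char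
-- because Pre_ restricts to indices in range (where Python A does not raise).
def wordScanner (sentence : String) (str_l : Int) : String × Int × Int × Int × Int :=
  let cs := sentence.toList
  let st := (PySem.List.pyRange 0 str_l 1).foldl
    (fun (acc : Int × Int × Int) i =>
      let c := PySem.List.pyGetD cs i ' '
      let l := if PySem.Chars.isalnum c then acc.1 + 1 else acc.1
      let s := if c = '.' ∨ c = '?' ∨ c = '!' then acc.2.1 + 1 else acc.2.1
      let w := if c = ' ' then acc.2.2 + 1 else acc.2.2
      (l, s, w))
    (0, 0, 1)
  (sentence, str_l, st.1, st.2.1, st.2.2)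

-- ===== PORT B =====
-- freq = {}; for c in prefix: freq[c] = freq.get(c, 0) + 1; then the three counts are
-- read off the histogram (sum() is List.sum per the type convention).
def wordScanner_alt (sentence : String) (str_l : Int) : String × Int × Int × Int × Int :=
  let pre := PySem.List.slice sentence.toList none (some (max 0 str_l))
  let freq := pre.foldl (fun (d : PySem.Dict Char Int) c => d.insert c (d.getD c 0 + 1)) PySem.Dict.empty
  let letter_count := ((freq.items.filter (fun p => PySem.Chars.isalnum p.1)).map (fun p => p.2)).sum
  (sentence, str_l, letter_count,
   freq.getD '.' 0 + freq.getD '?' 0 + freq.getD '!' 0,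
   1 + freq.getD ' ' 0)

-- ===== PRECONDITION & SPEC =====
-- Pre_ excludes exactly str_l > len(sentence), where Python A raises IndexError.
def Pre_wordScanner (sentence : String) (str_l : Int) : Prop :=
  str_l ≤ (sentence.toList.length : Int)
instance (sentence : String) (str_l : Int) : Decidable (Pre_wordScanner sentence str_l) := by unfold Pre_wordScanner; infer_instance

def pvWitness_wordScanner : String × Int := ("Hi there. Ok!", 13)

def Spec_wordScanner (sentence : String) (str_l : Int) (out : String × Int × Int × Int × Int) : Prop := out = wordScanner_alt sentence str_l
instance (sentence : String) (str_l : Int) (out : String × Int × Int × Int × Int) : Decidable (Spec_wordScanner sentence str_l out) := by unfold Spec_wordScanner; infer_instance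

-- ===== CLAIM (what is proved, stated in full; the proofs are below) =====
def Claim_equal_wordScanner : Prop := ∀ (sentence : String) (str_l : Int), Dom_wordScanner sentence str_l → Pre_wordScanner sentence str_l → Spec_wordScanner sentence str_l (wordScanner sentence str_l)

-- ===== LEMMAS AND PROOFS =====

-- the loop body of A's port, as a function of the fetched character
def stepA (acc : Int × Int × Int) (c : Char) : Int × Int × Int :=
  (if PySem.Chars.isalnum c then acc.1 + 1 else acc.1,
   if c = '.' ∨ c = '?' ∨ c = '!' then acc.2.1 + 1 else acc.2.1,
   if c = ' ' then acc.2.2 + 1 else acc.2.2)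

lemma wordScanner_eq_fold (sentence : String) (str_l : Int) :
    wordScanner sentence str_l =
      (sentence, str_l,
        ((PySem.List.pyRange 0 str_l 1).foldl
          (fun acc i => stepA acc (PySem.List.pyGetD sentence.toList i ' ')) (0, 0, 1)).1,
        ((PySem.List.pyRange 0 str_l 1).foldl
          (fun acc i => stepA acc (PySem.List.pyGetD sentence.toList i ' ')) (0, 0, 1)).2.1,
        ((PySem.List.pyRange 0 str_l 1).foldl
          (fun acc i => stepA acc (PySem.List.pyGetD sentence.toList i ' ')) (0, 0, 1)).2.2) := rfl

-- A's combined fold over any character list equals the three independent counts.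
lemma foldl_step_counts (l : List Char) (a b w : Int) :
    l.foldl stepA (a, b, w)
    = (a + (l.countP (fun c => PySem.Chars.isalnum c) : Int),
       b + (l.countP (fun c => c = '.' || c = '?' || c = '!') : Int),
       w + (List.count ' ' l : Int)) := by
  induction l generalizing a b w with
  | nil => simp
  | cons c t ih =>
    simp only [List.foldl_cons, stepA, ih, List.countP_cons, List.count_cons]
    refine Prod.ext ?_ (Prod.ext ?_ ?_) <;> simp <;> split_ifs <;> (try simp_all) <;> omega

-- the three sentence-ending characters are distinct, so the disjunctive countP splits
lemma countP_punct (l : List Char) :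
    l.countP (fun c => c = '.' || c = '?' || c = '!')
      = List.count '.' l + List.count '?' l + List.count '!' l := by
  induction l with
  | nil => simp
  | cons c t ih =>
    simp only [List.countP_cons, List.count_cons, ih]
    by_cases h1 : c = '.' <;> by_cases h2 : c = '?' <;> by_cases h3 : c = '!' <;>
      simp_all <;> omega

-- summing the histogram values over the distinct characters that satisfy a predicate
-- is counting the characters of the list that satisfy it
lemma sum_counter_filter (l : List Char) (p : Char → Bool) :
    ((((PySem.Dict.counter l).items.filter (fun q : Char × Int => p q.1)).map
        (fun q : Char × Int => q.2)).sum)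
      = (l.countP p : Int) := by
  rw [PySem.Dict.items_counter, List.filter_map, List.map_map]
  have hperm : (PySem.Set.ofList l).Perm l.dedup := by
    rw [List.perm_ext_iff_of_nodup (PySem.Set.nodup_ofList l) l.nodup_dedup]
    intro a; rw [PySem.Set.mem_ofList, List.mem_dedup]
  have hcomp : ((fun q : Char × Int => p q.1) ∘ fun k => (k, (List.count k l : Int))) = p := rfl
  rw [hcomp]
  rw [List.Perm.sum_eq (List.Perm.map _ (List.Perm.filter p hperm))]
  have : ((fun q : Char × Int => q.2) ∘ fun k => (k, (List.count k l : Int)))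
      = (fun n : Nat => (n : Int)) ∘ (fun k => List.count k l) := rfl
  rw [this, ← List.map_map, ← Nat.cast_list_sum,
      List.sum_map_count_dedup_filter_eq_countP]

-- B's port, rewritten as the three direct counts over the prefix
lemma alt_eq_counts (sentence : String) (str_l : Int) :
    wordScanner_alt sentence str_l =
      (sentence, str_l,
        ((PySem.List.slice sentence.toList none (some (max 0 str_l))).countP
            (fun c => PySem.Chars.isalnum c) : Int),
        ((PySem.List.slice sentence.toList none (some (max 0 str_l))).countP
            (fun c => c = '.' || c = '?' || c = '!') : Int),
        1 + (List.count ' ' (PySem.List.slice sentence.toList none (some (max 0 str_l))) : Int)) := by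
  unfold wordScanner_alt
  simp only [PySem.Dict.foldl_insert_getD_add_one_eq_counter, PySem.Dict.getD_counter,
    sum_counter_filter, countP_punct]
  push_cast
  ring_nf

-- ===== VERDICT (by name: the statement is the Claim_ definition above) =====
theorem wordScanner_spec : Claim_equal_wordScanner := by
  intro sentence str_l _ hpre
  unfold Spec_wordScanner
  rw [wordScanner_eq_fold, alt_eq_counts]
  by_cases hneg : str_l ≤ 0
  · have hmax : max 0 str_l = ((0 : Nat) : Int) := by omega
    rw [PySem.List.pyRange_one_eq_nil hneg, hmax, PySem.List.slice_to_natCast]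
    simp
  · set n : Nat := str_l.toNat with hn
    have hsl : str_l = (n : Int) := by omega
    have hmax : max 0 str_l = ((n : Nat) : Int) := by omega
    have hle : n ≤ sentence.toList.length := by
      have := hpre; unfold Pre_wordScanner at this; omega
    rw [hmax, PySem.List.slice_to_natCast]
    set pre := sentence.toList.take n with hpredef
    have hlenpre : (pre.length : Int) = str_l := by
      rw [hpredef, List.length_take, Nat.min_eq_left hle]; omega
    have hcongr : (PySem.List.pyRange 0 str_l 1).foldl
        (fun acc i => stepA acc (PySem.List.pyGetD sentence.toList i ' ')) (0, 0, 1)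
        = (PySem.List.pyRange 0 str_l 1).foldl
        (fun acc i => stepA acc (PySem.List.pyGetD pre i ' ')) (0, 0, 1) := by
      apply PySem.List.foldl_congr_mem
      intro acc i hi
      have hi' := (PySem.List.mem_pyRange_one).1 hi
      have hget : PySem.List.pyGetD sentence.toList i ' ' = PySem.List.pyGetD pre i ' ' := by
        have hik : i = ((i.toNat : Nat) : Int) := by omega
        rw [hik, PySem.List.pyGetD_natCast, PySem.List.pyGetD_natCast]
        have hlt : i.toNat < n := by omega
        simp [hpredef, hlt]
      rw [hget]
    rw [hcongr, ← hlenpre,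
        PySem.List.foldl_pyRange_zero_pyGetD' pre ' ' stepA ((0 : Int), (0 : Int), (1 : Int)),
        foldl_step_counts]
    simp
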